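-- pv_equiv track=rewrite | github.com/Adarshb2000/coding | CTIME.py | brute_code
-- ===== SOURCE A (Python) =====
-- def brute_code(F, K, proctoring):
--     if not K: return True
--     numbers = set(list(range(F)))
--     for s, e in proctoring.items():
--         for i in range(s, e):
--             numbers.discard(i)
--
--     for i in numbers:
--         for j in range(i, i + K):
--             if j not in numbers:
--                 break
--         else:
--             return True
--     return False
-- ===== SOURCE B (Python) =====
-- def brute_code(F, K, proctoring):
--     if K <= 0:
--         return True
--     items = list(proctoring.items())
--     return any(
--         0 <= c and c + K <= F and all(e <= c or s >= c + K or e <= s for s, e in items)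
--         for c in [0] + [e for _, e in items]
--     )
-- ===== Notes on version B (the rewrite author's own statement) =====
-- stated objective: faster
-- what changed: B drops A's materialised set of all F slots and per-slot window scans: a run of K free slots, if one exists, can start only at 0 or at some interval end, so B tests just those |M|+1 candidate starts against the interval list, removing the dependence on F and K.
-- intended difference: For K < 0 with every slot of [0,F) proctored, A returns False (its inner range(i,i+K) is empty so any free slot would yield True, but none exists) while B returns True: a request for a negative number of consecutive slots is vacuously satisfiable, so True is the intended value and A's False is an accident of its empty-range for-else. — e.g. on brute_code(1, -1, [(0, 1)]): A returns false, B returns true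
import Mathlib
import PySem

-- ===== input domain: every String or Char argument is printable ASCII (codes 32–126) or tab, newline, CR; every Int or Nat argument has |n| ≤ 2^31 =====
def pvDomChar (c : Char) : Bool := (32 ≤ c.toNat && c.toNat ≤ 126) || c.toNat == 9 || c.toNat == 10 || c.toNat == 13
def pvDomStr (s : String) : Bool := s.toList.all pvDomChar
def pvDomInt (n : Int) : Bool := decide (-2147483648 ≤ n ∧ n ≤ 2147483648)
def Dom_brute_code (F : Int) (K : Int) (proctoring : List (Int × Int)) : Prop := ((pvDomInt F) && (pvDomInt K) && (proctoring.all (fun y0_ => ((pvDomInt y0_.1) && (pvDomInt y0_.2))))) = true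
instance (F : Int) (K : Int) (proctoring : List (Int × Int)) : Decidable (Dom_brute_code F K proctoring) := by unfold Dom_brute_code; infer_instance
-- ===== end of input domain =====

-- B replaces A's materialised set of all F slots and its per-slot window scans by a test of
-- the |M|+1 candidate gap starts (0 and each interval end) against the interval list, so the
-- work no longer depends on F or K; for K < 0 B returns the vacuous True (see D_ below).

-- ===== PORT A =====
-- A's Python set is a hash set; it is ported as Std.TreeSet Int (exact as a finite set of
-- ints; A's result is independent of the set's iteration order, see the proofs below).
-- inner loop 'for j in range(i, i+K): if j not in numbers: break / else: return True'
def bruteWindow (numbers : Std.TreeSet Int) (j stop : Int) : Bool :=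
  if h : stop ≤ j then true
  else if numbers.contains j then bruteWindow numbers (j + 1) stop else false
termination_by (stop - j).toNat
decreasing_by omega

def brute_code (F : Int) (K : Int) (proctoring : List (Int × Int)) : Bool :=
  if K = 0 then true
  else
    -- numbers = set(range(F)); then discard every proctored slot
    let numbers : Std.TreeSet Int :=
      ((PySem.Dict.ofList proctoring).items).foldl
        (fun ns p => (PySem.List.pyRange p.1 p.2 1).foldl
          (fun ns i => ns.erase i) ns)
        (Std.TreeSet.ofList (PySem.List.pyRange 0 F 1))
    -- for i in numbers: <inner loop>; else: return True
    numbers.toList.any (fun i => bruteWindow numbers i (i + K))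

-- ===== PORT B =====
def brute_code_alt (F : Int) (K : Int) (proctoring : List (Int × Int)) : Bool :=
  if K ≤ 0 then true
  else
    let items := (PySem.Dict.ofList proctoring).items
    (0 :: items.map (fun p => p.2)).any (fun c =>
      decide (0 ≤ c) && decide (c + K ≤ F) &&
      items.all (fun p => decide (p.2 ≤ c) || decide (p.1 ≥ c + K) || decide (p.2 ≤ p.1)))

-- ===== PRECONDITION & SPEC =====
-- For K < 0 with every slot of [0,F) proctored, A returns False (its inner range(i,i+K) is
-- empty, so any free slot would give True, but none exists) while B returns True: a request
-- for a negative number of consecutive slots is vacuously satisfiable, so True is intended.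
def D_brute_code (F : Int) (K : Int) (proctoring : List (Int × Int)) : Prop :=
  let es := (PySem.Dict.ofList proctoring).items
  K < 0 ∧ ∀ c ∈ (0 : Int) :: es.map Prod.snd, c < 0 ∨ F ≤ c ∨ ∃ p ∈ es, p.1 ≤ c ∧ c < p.2
instance (F : Int) (K : Int) (proctoring : List (Int × Int)) : Decidable (D_brute_code F K proctoring) := by unfold D_brute_code; infer_instance
def Spec_brute_code (F : Int) (K : Int) (proctoring : List (Int × Int)) (out : Bool) : Prop := ¬ D_brute_code F K proctoring → out = brute_code_alt F K proctoring
instance (F : Int) (K : Int) (proctoring : List (Int × Int)) (out : Bool) : Decidable (Spec_brute_code F K proctoring out) := by unfold Spec_brute_code; infer_instance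
def pvDiffWitness_brute_code : Int × Int × (List (Int × Int)) := (1, -1, [(0, 1)])
def pvDiffWitnessOut_brute_code : Bool × Bool := (false, true)

-- ===== CLAIM (what is proved, stated in full; the proofs are below) =====
def Claim_unchanged_brute_code : Prop := ∀ (F : Int) (K : Int) (proctoring : List (Int × Int)), Dom_brute_code F K proctoring → Spec_brute_code F K proctoring (brute_code F K proctoring)
def Claim_changed_brute_code : Prop := Dom_brute_code (pvDiffWitness_brute_code.1) (pvDiffWitness_brute_code.2.1) (pvDiffWitness_brute_code.2.2) ∧ D_brute_code (pvDiffWitness_brute_code.1) (pvDiffWitness_brute_code.2.1) (pvDiffWitness_brute_code.2.2) ∧ brute_code (pvDiffWitness_brute_code.1) (pvDiffWitness_brute_code.2.1) (pvDiffWitness_brute_code.2.2) = pvDiffWitnessOut_brute_code.1 ∧ brute_code_alt (pvDiffWitness_brute_code.1) (pvDiffWitness_brute_code.2.1) (pvDiffWitness_brute_code.2.2) = pvDiffWitnessOut_brute_code.2 ∧ pvDiffWitnessOut_brute_code.1 ≠ pvDiffWitnessOut_brute_code.2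
def Claim_exact_brute_code : Prop := ∀ (F : Int) (K : Int) (proctoring : List (Int × Int)), Dom_brute_code F K proctoring → D_brute_code F K proctoring → brute_code F K proctoring ≠ brute_code_alt F K proctoring

-- ===== LEMMAS AND PROOFS =====

-- j is covered by some proctoring interval
def coversP (its : List (Int × Int)) (j : Int) : Prop := ∃ p ∈ its, p.1 ≤ j ∧ j < p.2

-- j is a free slot of [0, F)
def freeP (F : Int) (its : List (Int × Int)) (j : Int) : Prop :=
  0 ≤ j ∧ j < F ∧ ¬ coversP its j

-- all of [i, i+K) is free
def runP (F K : Int) (its : List (Int × Int)) (i : Int) : Prop :=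
  ∀ j, i ≤ j → j < i + K → freeP F its j

-- B's per-candidate test
def goodP (F K : Int) (its : List (Int × Int)) (c : Int) : Prop :=
  0 ≤ c ∧ c + K ≤ F ∧ ∀ p ∈ its, p.2 ≤ c ∨ c + K ≤ p.1 ∨ p.2 ≤ p.1

lemma mem_foldl_discard (l : List Int) (s : Std.TreeSet Int) (y : Int) :
    y ∈ l.foldl (fun ns i => ns.erase i) s ↔ y ∈ s ∧ y ∉ l := by
  induction l generalizing s with
  | nil => simp
  | cons x xs ih =>
    simp [ih, Std.TreeSet.mem_erase]
    tauto

lemma mem_foldl_intervals (its : List (Int × Int)) (s : Std.TreeSet Int) (y : Int) :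
    y ∈ its.foldl (fun ns p => (PySem.List.pyRange p.1 p.2 1).foldl
        (fun ns i => ns.erase i) ns) s ↔ y ∈ s ∧ ¬ coversP its y := by
  induction its generalizing s with
  | nil => simp [coversP]
  | cons p ps ih =>
    simp only [List.foldl_cons, ih, mem_foldl_discard, PySem.List.mem_pyRange_one, coversP]
    constructor
    · rintro ⟨⟨hs, hnp⟩, hps⟩
      refine ⟨hs, ?_⟩
      rintro ⟨q, hq, hcov⟩
      rcases List.mem_cons.mp hq with rfl | hq'
      · exact hnp hcov
      · exact hps ⟨q, hq', hcov⟩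
    · rintro ⟨hs, hnc⟩
      refine ⟨⟨hs, fun h => hnc ⟨p, List.mem_cons_self, h⟩⟩, ?_⟩
      rintro ⟨q, hq, hcov⟩
      exact hnc ⟨q, List.mem_cons_of_mem _ hq, hcov⟩

-- membership in A's 'numbers' set is exactly freeness
lemma mem_numbers (F : Int) (its : List (Int × Int)) (y : Int) :
    y ∈ its.foldl (fun ns p => (PySem.List.pyRange p.1 p.2 1).foldl
        (fun ns i => ns.erase i) ns)
      (Std.TreeSet.ofList (PySem.List.pyRange 0 F 1)) ↔ freeP F its y := by
  rw [mem_foldl_intervals, Std.TreeSet.mem_ofList]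
  simp only [List.contains_iff_mem, PySem.List.mem_pyRange_one, freeP]
  tauto

lemma bruteWindow_eq_true (numbers : Std.TreeSet Int) (j stop : Int) :
    bruteWindow numbers j stop = true ↔
      ∀ x, j ≤ x → x < stop → x ∈ numbers := by
  rw [bruteWindow]
  split
  · constructor
    · intro _ x hx1 hx2; omega
    · intro _; rfl
  · rename_i h
    split
    · rename_i hc
      rw [bruteWindow_eq_true numbers (j + 1) stop]
      constructor
      · intro hrec x hx1 hx2
        by_cases hxj : x = j
        · exact hxj ▸ (Std.TreeSet.contains_iff_mem.mp hc)
        · exact hrec x (by omega) hx2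
      · intro hall x hx1 hx2
        exact hall x (by omega) hx2
    · rename_i hc
      refine ⟨fun h' => by simp at h', fun hall => ?_⟩
      exact absurd (hc (Std.TreeSet.contains_iff_mem.mpr
        (hall j (le_refl j) (by omega)))) (fun h' => h')
termination_by (stop - j).toNat
decreasing_by omega

lemma good_imp_run (F K : Int) (its : List (Int × Int)) (c : Int)
    (h : goodP F K its c) : runP F K its c := by
  obtain ⟨h0, hF, hiv⟩ := h
  intro j hj1 hj2
  refine ⟨by omega, by omega, ?_⟩
  rintro ⟨p, hp, hc1, hc2⟩
  rcases hiv p hp with h | h | h <;> omega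

lemma good_of_run (F K : Int) (its : List (Int × Int)) (i : Int)
    (hK : 1 ≤ K) (h0 : 0 ≤ i) (hr : runP F K its i) : goodP F K its i := by
  have hlast := hr (i + K - 1) (by omega) (by omega)
  refine ⟨h0, by obtain ⟨_, h, _⟩ := hlast; omega, ?_⟩
  intro p hp
  by_contra hcon
  push Not at hcon
  obtain ⟨h1, h2, h3⟩ := hcon
  have hj := hr (max p.1 i) (by omega) (by omega)
  exact hj.2.2 ⟨p, hp, by omega, by omega⟩

lemma exists_good_of_run (F K : Int) (its : List (Int × Int))
    (hK : 1 ≤ K) :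
    ∀ (n : Nat) (i : Int), i.toNat = n → runP F K its i →
      ∃ c ∈ (0 : Int) :: its.map (fun p => p.2), goodP F K its c := by
  intro n
  induction n using Nat.strong_induction_on with
  | _ n ih =>
    intro i hn hr
    have hfree := hr i (le_refl i) (by omega)
    have h0 : 0 ≤ i := hfree.1
    by_cases hi0 : i = 0
    · exact ⟨0, List.mem_cons_self, hi0 ▸ good_of_run F K its i hK h0 hr⟩
    · have hipos : 1 ≤ i := by omega
      by_cases hprev : freeP F its (i - 1)
      · have hr' : runP F K its (i - 1) := by
          intro j hj1 hj2
          by_cases hji : j = i - 1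
          · exact hji ▸ hprev
          · exact hr j (by omega) (by omega)
        exact ih (i - 1).toNat (by omega) (i - 1) rfl hr'
      · -- i-1 is in [0,F) but not free: it is covered, and the covering interval ends at i
        have hiF : i < F := hfree.2.1
        have hcov : coversP its (i - 1) := by
          by_contra hnc
          exact hprev ⟨by omega, by omega, hnc⟩
        obtain ⟨p, hp, hc1, hc2⟩ := hcov
        have hpe : p.2 = i := by
          have := hfree.2.2
          by_contra hne
          exact this ⟨p, hp, by omega, by omega⟩
        refine ⟨i, List.mem_cons_of_mem _ ?_, good_of_run F K its i hK h0 hr⟩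
        exact List.mem_map.mpr ⟨p, hp, hpe⟩

lemma run_iff_good (F K : Int) (its : List (Int × Int)) (hK : 1 ≤ K) :
    (∃ i, runP F K its i) ↔
      ∃ c ∈ (0 : Int) :: its.map (fun p => p.2), goodP F K its c := by
  constructor
  · rintro ⟨i, hr⟩
    exact exists_good_of_run F K its hK i.toNat i rfl hr
  · rintro ⟨c, _, hg⟩
    exact ⟨c, good_imp_run F K its c hg⟩

-- a free slot exists iff one of the candidate slots (0 or an interval end) is free
lemma exists_free_iff_candidate (F : Int) (its : List (Int × Int)) :
    (∃ i, freeP F its i) ↔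
      ∃ c ∈ (0 : Int) :: its.map (fun p => p.2), freeP F its c := by
  constructor
  · rintro ⟨i, hf⟩
    have hrun : runP F 1 its i := by
      intro j hj1 hj2
      have : j = i := by omega
      exact this ▸ hf
    obtain ⟨c, hc, hg⟩ := exists_good_of_run F 1 its (le_refl 1) i.toNat i rfl hrun
    exact ⟨c, hc, good_imp_run F 1 its c hg c (le_refl c) (by omega)⟩
  · rintro ⟨c, _, hf⟩
    exact ⟨c, hf⟩

-- D_'s second conjunct says exactly: no free slot
lemma D_cov_iff (F : Int) (its : List (Int × Int)) :
    (∀ c ∈ (0 : Int) :: its.map Prod.snd,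
        c < 0 ∨ F ≤ c ∨ ∃ p ∈ its, p.1 ≤ c ∧ c < p.2) ↔ ¬ ∃ i, freeP F its i := by
  rw [exists_free_iff_candidate]
  constructor
  · rintro h ⟨c, hc, h0, hF, hnc⟩
    rcases h c hc with h' | h' | h'
    · omega
    · omega
    · exact hnc h'
  · intro h c hc
    by_cases h0 : c < 0
    · exact Or.inl h0
    by_cases hF : F ≤ c
    · exact Or.inr (Or.inl hF)
    refine Or.inr (Or.inr ?_)
    by_contra hnc
    exact h ⟨c, hc, by omega, by omega, hnc⟩

-- A's truth condition for positive K
lemma brute_code_char_pos (F K : Int) (pr : List (Int × Int)) (hK : 0 < K) :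
    (brute_code F K pr = true ↔
      ∃ i, runP F K ((PySem.Dict.ofList pr).items) i) := by
  simp only [brute_code, if_neg (by omega : K ≠ 0), List.any_eq_true,
    Std.TreeSet.mem_toList, bruteWindow_eq_true]
  constructor
  · rintro ⟨i, _, hall⟩
    exact ⟨i, fun j hj1 hj2 => (mem_numbers F _ j).mp (hall j hj1 hj2)⟩
  · rintro ⟨i, hrun⟩
    refine ⟨i, (mem_numbers F _ i).mpr (hrun i (le_refl i) (by omega)),
      fun j hj1 hj2 => (mem_numbers F _ j).mpr (hrun j hj1 hj2)⟩

-- A's truth condition for negative K: the inner range is empty, so A is true iff a free slot exists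
lemma brute_code_char_neg (F K : Int) (pr : List (Int × Int)) (hK : K < 0) :
    (brute_code F K pr = true ↔
      ∃ i, freeP F ((PySem.Dict.ofList pr).items) i) := by
  simp only [brute_code, if_neg (by omega : K ≠ 0), List.any_eq_true,
    Std.TreeSet.mem_toList, bruteWindow_eq_true]
  constructor
  · rintro ⟨i, hi, _⟩
    exact ⟨i, (mem_numbers F _ i).mp hi⟩
  · rintro ⟨i, hfree⟩
    exact ⟨i, (mem_numbers F _ i).mpr hfree, fun x hx1 hx2 => by omega⟩

lemma brute_code_alt_char (F K : Int) (pr : List (Int × Int)) (hK : 0 < K) :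
    (brute_code_alt F K pr = true ↔
      ∃ c ∈ (0 : Int) :: ((PySem.Dict.ofList pr).items).map (fun p => p.2),
        goodP F K ((PySem.Dict.ofList pr).items) c) := by
  simp only [brute_code_alt, if_neg (by omega : ¬ K ≤ 0), List.any_eq_true, List.all_eq_true,
    Bool.and_eq_true, Bool.or_eq_true, decide_eq_true_eq, ge_iff_le, goodP]
  constructor
  · rintro ⟨c, hc, ⟨h1, h2⟩, h3⟩
    exact ⟨c, hc, h1, h2, fun p hp => by have := h3 p hp; tauto⟩
  · rintro ⟨c, hc, h1, h2, h3⟩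
    exact ⟨c, hc, ⟨h1, h2⟩, fun p hp => by have := h3 p hp; tauto⟩

-- ===== VERDICT (by name: the statement is the Claim_ definition above) =====
theorem brute_code_spec : Claim_unchanged_brute_code := by
  intro F K pr _
  unfold Spec_brute_code
  intro hnD
  rcases lt_trichotomy K 0 with hK | hK | hK
  · -- K < 0: ¬D_ gives a free slot, so both sides are true
    have hfree : ∃ i, freeP F ((PySem.Dict.ofList pr).items) i := by
      by_contra hno
      exact hnD ⟨hK, (D_cov_iff F _).mpr hno⟩
    have hKle : K ≤ 0 := by omega
    rw [(brute_code_char_neg F K pr hK).mpr hfree]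
    simp [brute_code_alt, hKle]
  · simp [brute_code, brute_code_alt, hK]
  · rw [Bool.eq_iff_iff, brute_code_char_pos F K pr hK, brute_code_alt_char F K pr hK,
      run_iff_good F K _ (by omega)]

theorem brute_code_changed : Claim_changed_brute_code := by
  unfold Claim_changed_brute_code; decide

theorem brute_code_tight : Claim_exact_brute_code := by
  intro F K pr _ hD
  obtain ⟨hK, hcov⟩ := hD
  have hKle : K ≤ 0 := by omega
  have hB : brute_code_alt F K pr = true := by
    simp [brute_code_alt, hKle]
  have hA : brute_code F K pr = false := by
    rw [← Bool.not_eq_true, brute_code_char_neg F K pr hK]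
    exact fun h => (D_cov_iff F _).mp hcov h
  rw [hA, hB]; simp
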